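-- pv_equiv track=rewrite | github.com/aysenaborisova/bb | 23dec.py | preobraz
-- ===== SOURCE A (Python) =====
-- def preobraz(current, target, ten=False):
--     if current > target:
--         return 0
--     if current == target:
--         return 1 if ten else 0
--
--     n = ten or current == 10
--
--     return (preobraz(current + 1, target, n) +
--             preobraz(current + 2, target, n) +
--             preobraz(current * 2, target, n))
-- ===== SOURCE B (Python) =====
-- def preobraz(current, target, ten=False):
--     if current > target:
--         return 0
--     if current == target:
--         return 1 if ten else 0
--     n = target - current
--     # dp[i] = (paths from current+i to target that have passed 10,
--     #          paths from current+i that have not yet passed 10)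
--     dp = [(0, 0)] * (n + 1)
--     dp[n] = (1, 0)
--     for i in range(n - 1, -1, -1):
--         c = current + i
--
--         def val(x, passed):
--             j = x - current
--             if j > n:
--                 return 0
--             return dp[j][0] if passed else dp[j][1]
--
--         p = (c == 10)
--         fT = val(c + 1, True) + val(c + 2, True) + val(2 * c, True)
--         fF = val(c + 1, p) + val(c + 2, p) + val(2 * c, p)
--         dp[i] = (fT, fF)
--     return dp[0][0] if ten else dp[0][1]
-- ===== Notes on version B (the rewrite author's own statement) =====
-- stated objective: alternative
-- what changed: Replaced the three-way branching recursion by a bottom-up dynamic-programming table over positions current..target with one (passed-10, not-yet) pair per position.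
import Mathlib
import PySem

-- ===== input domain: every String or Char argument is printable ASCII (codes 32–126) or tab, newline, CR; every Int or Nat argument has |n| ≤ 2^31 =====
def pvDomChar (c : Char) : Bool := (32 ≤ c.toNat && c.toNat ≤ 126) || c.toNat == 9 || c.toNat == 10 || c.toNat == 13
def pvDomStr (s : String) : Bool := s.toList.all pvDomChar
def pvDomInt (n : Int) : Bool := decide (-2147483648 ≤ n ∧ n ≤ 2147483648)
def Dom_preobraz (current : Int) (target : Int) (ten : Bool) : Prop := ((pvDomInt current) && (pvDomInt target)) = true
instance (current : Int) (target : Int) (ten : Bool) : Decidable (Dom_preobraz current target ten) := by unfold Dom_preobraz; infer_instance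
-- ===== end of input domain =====

-- B replaces A's three-way branching recursion by a bottom-up DP table over
-- positions current..target (one (passed-10, not-yet) pair per position); alternative algorithm.


-- ===== PORT A =====
-- A's recursion, made total with fuel ((target-current).toNat + 1 suffices on Pre_;
-- on inputs excluded by Pre_ the Python recursion does not terminate).
def preobrazGoA (fuel : Nat) (current target : Int) (ten : Bool) : Int :=
  match fuel with
  | 0 => 0
  | Nat.succ f =>
    if current > target then 0
    else if current = target then (if ten then 1 else 0)
    else
      let n := ten || (current == 10)
      preobrazGoA f (current + 1) target n +
      preobrazGoA f (current + 2) target n +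
      preobrazGoA f (current * 2) target n

def preobraz (current : Int) (target : Int) (ten : Bool) : Int :=
  preobrazGoA ((target - current).toNat + 1) current target ten

-- ===== PORT B =====
-- builds the dp table for positions c..target (i = target - c entries below the head);
-- entry = (paths having passed 10, paths not yet having passed 10)
def preobrazGoB (i : Nat) (c target : Int) : List (Int × Int) :=
  match i with
  | 0 => [(1, 0)]
  | Nat.succ j =>
    let rest := preobrazGoB j (c + 1) target
    let val := fun (x : Int) (passed : Bool) =>
      let e := rest.getD ((x - (c + 1)).toNat) (0, 0)
      if passed then e.1 else e.2
    let p : Bool := (c == 10)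
    let fT := val (c + 1) true + val (c + 2) true + val (2 * c) true
    let fF := val (c + 1) p + val (c + 2) p + val (2 * c) p
    (fT, fF) :: rest

def preobraz_alt (current : Int) (target : Int) (ten : Bool) : Int :=
  if current > target then 0
  else if current = target then (if ten then 1 else 0)
  else
    let dp := preobrazGoB ((target - current).toNat) current target
    let e := dp.getD 0 (0, 0)
    if ten then e.1 else e.2

-- ===== PRECONDITION & SPEC =====
-- Pre_ excludes (a) current ≤ 0 and current < target, where A's `current * 2` branch
-- recurses forever (RecursionError / non-termination), and (b) target - current > 900,
-- where A's +1 call chain exceeds CPython's recursion limit and A raises RecursionError.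
def Pre_preobraz (current : Int) (target : Int) (ten : Bool) : Prop :=
  (1 ≤ current ∨ target ≤ current) ∧ target - current ≤ 900
instance (current : Int) (target : Int) (ten : Bool) : Decidable (Pre_preobraz current target ten) := by unfold Pre_preobraz; infer_instance

def pvWitness_preobraz : Int × Int × Bool := (1, 12, false)

def Spec_preobraz (current : Int) (target : Int) (ten : Bool) (out : Int) : Prop := out = preobraz_alt current target ten
instance (current : Int) (target : Int) (ten : Bool) (out : Int) : Decidable (Spec_preobraz current target ten out) := by unfold Spec_preobraz; infer_instance

-- ===== CLAIM (what is proved, stated in full; the proofs are below) =====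
def Claim_equal_preobraz : Prop := ∀ (current : Int) (target : Int) (ten : Bool), Dom_preobraz current target ten → Pre_preobraz current target ten → Spec_preobraz current target ten (preobraz current target ten)

-- ===== LEMMAS AND PROOFS =====

-- canonical-fuel value of A's recursion
def preobrazF (c t : Int) (ten : Bool) : Int := preobrazGoA ((t - c).toNat + 1) c t ten

-- fuel irrelevance: any sufficient fuel gives the canonical value (for 1 ≤ c)
theorem preobrazGoA_fuel (f : Nat) : ∀ (c t : Int) (ten : Bool), 1 ≤ c →
    (t - c).toNat < f → preobrazGoA f c t ten = preobrazF c t ten := by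
  induction f using Nat.strong_induction_on with
  | _ f ih =>
    intro c t ten hc h
    obtain ⟨f', rfl⟩ : ∃ f', f = f' + 1 := ⟨f - 1, by omega⟩
    unfold preobrazF
    by_cases hgt : c > t
    · simp [preobrazGoA, hgt]
    · by_cases heq : c = t
      · simp [preobrazGoA, heq]
      · simp only [preobrazGoA, hgt, heq, ite_false]
        rw [ih f' (by omega) (c + 1) t _ (by omega) (by omega),
            ih f' (by omega) (c + 2) t _ (by omega) (by omega),
            ih f' (by omega) (c * 2) t _ (by omega) (by omega),
            ih ((t - c).toNat) (by omega) (c + 1) t _ (by omega) (by omega),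
            ih ((t - c).toNat) (by omega) (c + 2) t _ (by omega) (by omega),
            ih ((t - c).toNat) (by omega) (c * 2) t _ (by omega) (by omega)]

theorem preobrazF_base_gt (c t : Int) (ten : Bool) (h : c > t) :
    preobrazF c t ten = 0 := by simp [preobrazF, preobrazGoA, h]

theorem preobrazF_step (c t : Int) (ten : Bool) (hc : 1 ≤ c) (hlt : c < t) :
    preobrazF c t ten =
      preobrazF (c + 1) t (ten || (c == 10)) +
      preobrazF (c + 2) t (ten || (c == 10)) +
      preobrazF (c * 2) t (ten || (c == 10)) := by
  conv_lhs => rw [preobrazF]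
  rw [show (t - c).toNat + 1 = Nat.succ ((t - c).toNat) from rfl]
  simp only [preobrazGoA, if_neg (by omega : ¬ c > t), if_neg (by omega : ¬ c = t)]
  rw [preobrazGoA_fuel _ _ _ _ (by omega) (by omega),
      preobrazGoA_fuel _ _ _ _ (by omega) (by omega),
      preobrazGoA_fuel _ _ _ _ (by omega) (by omega)]

theorem preobrazGoB_length (i : Nat) : ∀ (c t : Int),
    (preobrazGoB i c t).length = i + 1 := by
  induction i with
  | zero => intro c t; simp [preobrazGoB]
  | succ m ihm => intro c t; simpa [preobrazGoB] using ihm (c + 1) t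

-- the dp table computed by B holds exactly A's canonical values
theorem preobrazGoB_spec (i : Nat) : ∀ (c t : Int), 1 ≤ c → t = c + i →
    ∀ k : Nat, k ≤ i →
      (preobrazGoB i c t).getD k (0, 0) =
        (preobrazF (c + k) t true, preobrazF (c + k) t false) := by
  induction i with
  | zero =>
    intro c t hc ht k hk
    interval_cases k
    simp [preobrazGoB, preobrazF, preobrazGoA, ht]
  | succ j ih =>
    intro c t hc ht k hk
    have hrest := ih (c + 1) t (by omega) (by omega)
    -- valuation: for x ≥ c + 1, looking x up in rest gives its canonical pair
    have hval : ∀ x : Int, c + 1 ≤ x →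
        (preobrazGoB j (c + 1) t).getD ((x - (c + 1)).toNat) (0, 0) =
          (preobrazF x t true, preobrazF x t false) := by
      intro x hx
      by_cases hle : x ≤ t
      · have hk' : (x - (c + 1)).toNat ≤ j := by omega
        have := hrest ((x - (c + 1)).toNat) hk'
        rwa [show c + 1 + ((x - (c + 1)).toNat : Int) = x by omega] at this
      · have hbig : (preobrazGoB j (c + 1) t).length ≤ (x - (c + 1)).toNat := by
          rw [preobrazGoB_length]; omega
        rw [List.getD_eq_default _ _ hbig,
            preobrazF_base_gt _ _ _ (by omega), preobrazF_base_gt _ _ _ (by omega)]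
    match k with
    | 0 =>
      show ((_ : Int × Int) :: _).getD 0 _ = _
      simp only [List.getD_cons_zero]
      have e1 := hval (c + 1) (by omega)
      have e2 := hval (c + 2) (by omega)
      have e3 := hval (2 * c) (by omega)
      have hstepT := preobrazF_step c t true hc (by omega)
      have hstepF := preobrazF_step c t false hc (by omega)
      rw [Prod.mk.injEq]
      constructor
      · simp only [e1, e2, e3, if_pos]
        rw [show c + ((0 : Nat) : Int) = c by simp, hstepT]
        simp [mul_comm]
      · simp only [e1, e2, e3]
        rw [show c + ((0 : Nat) : Int) = c by simp, hstepF]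
        cases h10 : (c == 10) <;> simp [mul_comm]
    | Nat.succ k' =>
      show ((_ : Int × Int) :: _).getD (k' + 1) _ = _
      simp only [List.getD_cons_succ]
      have := hrest k' (by omega)
      rwa [show c + 1 + (k' : Int) = c + (↑(k' + 1) : Int) by push_cast; ring] at this

-- ===== VERDICT (by name: the statement is the Claim_ definition above) =====
theorem preobraz_spec : Claim_equal_preobraz := by
  intro c t ten _ hpre
  unfold Spec_preobraz preobraz preobraz_alt
  by_cases hgt : c > t
  · simp [preobrazGoA, hgt]
  · by_cases heq : c = t
    · simp [preobrazGoA, heq]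
    · have hc : 1 ≤ c := by rcases hpre.1 with h | h <;> omega
      have hlt : c < t := by omega
      have hmain := preobrazGoB_spec ((t - c).toNat) c t hc (by omega) 0 (by omega)
      simp only [Int.natCast_zero, add_zero] at hmain
      simp only [if_neg hgt, if_neg heq, hmain]
      show preobrazF c t ten = _
      cases ten <;> simp
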